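-- pv_equiv track=rewrite | github.com/Sayeem2004/AdventOfCode | 2018/D2/1/1.py | solve
-- ===== SOURCE A (Python) =====
-- def solve(lines):
--     two,three = 0,0
--     for line in lines:
--         dict = {};
--         for l in line:
--             if (l in dict): dict[l]+=1;
--             else: dict[l] = 1;
--         for d in dict:
--             if (dict[d] == 2): two+=1; break;
--         for d in dict:
--             if (dict[d] == 3): three+=1; break;
--     return two*three;
-- ===== SOURCE B (Python) =====
-- def solve(lines):
--     two = three = 0
--     for line in lines:
--         s = sorted(line)
--         runs = []
--         i = 0
--         while i < len(s):
--             j = i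
--             while j < len(s) and s[j] == s[i]:
--                 j += 1
--             runs.append(j - i)
--             i = j
--         two += 2 in runs
--         three += 3 in runs
--     return two * three
-- ===== Notes on version B (the rewrite author's own statement) =====
-- stated objective: alternative
-- what changed: Replaces the per-line hash-map frequency dict plus two break-scans over the dict with sort-the-line-then-scan-consecutive-runs: run lengths of the sorted line are its letter frequencies, and membership of 2/3 in the run-length list drives the two counters.
import Mathlib
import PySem

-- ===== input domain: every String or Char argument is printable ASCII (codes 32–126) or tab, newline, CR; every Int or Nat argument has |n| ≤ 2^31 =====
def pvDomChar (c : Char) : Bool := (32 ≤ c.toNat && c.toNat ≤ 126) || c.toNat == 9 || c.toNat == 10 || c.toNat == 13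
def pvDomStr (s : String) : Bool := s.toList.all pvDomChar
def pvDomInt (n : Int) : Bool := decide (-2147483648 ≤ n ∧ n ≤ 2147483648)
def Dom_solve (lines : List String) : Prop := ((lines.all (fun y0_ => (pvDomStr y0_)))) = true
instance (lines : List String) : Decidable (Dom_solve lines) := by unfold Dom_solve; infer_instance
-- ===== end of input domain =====

-- B replaces A's per-line frequency dict + break-scans by sort-the-line-then-scan-consecutive-runs (alternative algorithm, not claimed faster).

-- ===== PORT A =====
def solve (lines : List String) : Int :=
  let p := lines.foldl (fun (p : Int × Int) line =>
    let d := line.toList.foldl (fun (d : PySem.Dict Char Int) l =>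
      if d.contains l then d.insert l (d.getD l 0 + 1) else d.insert l 1) PySem.Dict.empty
    -- 'for d in dict: if dict[d] == 2: two += 1; break' = bump once iff some key scans to value 2
    let two := if d.keys.any (fun k => d.getD k 0 == 2) then p.1 + 1 else p.1
    let three := if d.keys.any (fun k => d.getD k 0 == 3) then p.2 + 1 else p.2
    (two, three)) (0, 0)
  p.1 * p.2

-- ===== PORT B =====
-- the nested while loops of Source B: each outer step takes one maximal run of equal chars
def runLengths : List Char → List Nat
  | [] => []
  | c :: rest => (1 + (rest.takeWhile (· == c)).length) :: runLengths (rest.dropWhile (· == c))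
termination_by l => l.length
decreasing_by
  have := List.length_dropWhile_le (· == c) rest
  simp; omega

def solve_alt (lines : List String) : Int :=
  let p := lines.foldl (fun (p : Int × Int) line =>
    let runs := runLengths (PySem.List.sorted line.toList (fun x => x) false)
    (p.1 + (if 2 ∈ runs then 1 else 0), p.2 + (if 3 ∈ runs then 1 else 0))) (0, 0)
  p.1 * p.2

-- ===== PRECONDITION & SPEC =====
def Spec_solve (lines : List String) (out : Int) : Prop := out = solve_alt lines
instance (lines : List String) (out : Int) : Decidable (Spec_solve lines out) := by unfold Spec_solve; infer_instance

-- ===== CLAIM (what is proved, stated in full; the proofs are below) =====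
def Claim_equal_solve : Prop := ∀ (lines : List String), Dom_solve lines → Spec_solve lines (solve lines)

-- ===== LEMMAS AND PROOFS =====

-- A's dict-building loop is the standard counter loop
theorem counter_fold (s : List Char) :
    s.foldl (fun (d : PySem.Dict Char Int) l =>
      if d.contains l then d.insert l (d.getD l 0 + 1) else d.insert l 1) PySem.Dict.empty
    = PySem.Dict.counter s := by
  rw [← PySem.Dict.foldl_insert_getD_add_one_eq_counter]
  congr 1
  funext d l
  by_cases h : d.contains l
  · simp [h]
  · simp only [h, if_false, Bool.false_eq_true]
    rw [PySem.Dict.getD_of_not_contains _ _ (by simpa using h)]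
    norm_num

-- A's break-scan over the counter finds a key of value n iff some char occurs n times
theorem a_side (s : List Char) (n : Int) :
    ((PySem.Dict.counter s).keys.any (fun k => (PySem.Dict.counter s).getD k 0 == n)) = true
    ↔ ∃ c ∈ s, (s.count c : Int) = n := by
  simp [List.any_eq_true, PySem.Dict.keys_counter, PySem.Set.mem_ofList, PySem.Dict.getD_counter]

-- in a ≤-sorted list, the first run is all the copies of the head
theorem takeWhile_count (c : Char) (rest : List Char) (h : (c :: rest).Pairwise (· ≤ ·)) :
    (rest.takeWhile (· == c)).length = rest.count c := by
  induction rest with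
  | nil => simp
  | cons a t ih =>
    rcases List.pairwise_cons.mp h with ⟨hle, ht⟩
    by_cases hac : a = c
    · subst hac
      rw [List.takeWhile_cons]
      simp only [beq_self_eq_true, if_true, List.length_cons, List.count_cons_self]
      rw [ih ht]
    · have hca : c < a := lt_of_le_of_ne (hle a (by simp)) (fun e => hac e.symm)
      have hz : t.count c = 0 := by
        rw [List.count_eq_zero]
        intro hm
        rcases List.pairwise_cons.mp ht with ⟨hat, _⟩
        exact absurd (hat c hm) (not_le.mpr hca)
      rw [List.takeWhile_cons]
      simp [hac, hz, List.count_cons_of_ne (a := c) (b := a) hac]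

-- the head's char does not survive the dropWhile in a sorted list
theorem not_mem_dropWhile (c : Char) (rest : List Char) (h : (c :: rest).Pairwise (· ≤ ·)) :
    c ∉ rest.dropWhile (· == c) := by
  induction rest with
  | nil => simp
  | cons a t ih =>
    rcases List.pairwise_cons.mp h with ⟨hle, ht⟩
    by_cases hac : a = c
    · subst hac
      rw [List.dropWhile_cons]
      simpa using ih ht
    · have hca : c < a := lt_of_le_of_ne (hle a (by simp)) (fun e => hac e.symm)
      rw [List.dropWhile_cons]
      simp only [beq_iff_eq, hac, if_false]
      intro hm
      rcases List.mem_cons.mp hm with hm | hm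
      · exact hac hm.symm
      · rcases List.pairwise_cons.mp ht with ⟨hat, _⟩
        have := hat c hm
        exact absurd this (not_le.mpr hca)

-- the run lengths of a sorted list are exactly the multiplicities of its members
theorem mem_runLengths (l : List Char) (h : l.Pairwise (· ≤ ·)) (n : Nat) :
    n ∈ runLengths l ↔ ∃ c ∈ l, l.count c = n := by
  induction l using runLengths.induct with
  | case1 => simp [runLengths]
  | case2 c rest ih =>
    have hsplit : rest.takeWhile (· == c) ++ rest.dropWhile (· == c) = rest :=
      List.takeWhile_append_dropWhile
    have hd : (rest.dropWhile (· == c)).Pairwise (· ≤ ·) :=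
      (List.pairwise_cons.mp h).2.sublist (List.dropWhile_sublist _)
    have hcnd := not_mem_dropWhile c rest h
    have hcount : (c :: rest).count c = 1 + (rest.takeWhile (· == c)).length := by
      rw [List.count_cons_self, takeWhile_count c rest h]; omega
    -- counts of dropWhile members agree with counts in the whole list
    have hagree : ∀ c' ∈ rest.dropWhile (· == c), (c :: rest).count c' = (rest.dropWhile (· == c)).count c' := by
      intro c' hc'
      have hne : c' ≠ c := fun e => hcnd (e ▸ hc')
      have htw : (rest.takeWhile (· == c)).count c' = 0 := by
        rw [List.count_eq_zero]
        intro hm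
        have := List.mem_takeWhile_imp hm
        exact hne (by simpa using this)
      rw [List.count_cons_of_ne hne.symm]
      conv_lhs => rw [← hsplit]
      rw [List.count_append, htw]
      omega
    rw [runLengths]
    constructor
    · intro hm
      rcases List.mem_cons.mp hm with he | hm
      · exact ⟨c, by simp, by omega⟩
      · rcases (ih hd).mp hm with ⟨c', hc', hcnt⟩
        refine ⟨c', ?_, ?_⟩
        · exact List.mem_cons_of_mem c (hsplit ▸ List.mem_append_right _ hc')
        · rw [hagree c' hc']; exact hcnt
    · rintro ⟨c', hc', hcnt⟩
      by_cases he : c' = c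
      · subst he
        exact List.mem_cons.mpr (Or.inl (by omega))
      · have hr : c' ∈ rest := by
          rcases List.mem_cons.mp hc' with e | hr
          · exact absurd e he
          · exact hr
        have hdw : c' ∈ rest.dropWhile (· == c) := by
          rw [← hsplit] at hr
          rcases List.mem_append.mp hr with hm | hm
          · exact absurd (by simpa using List.mem_takeWhile_imp hm) he
          · exact hm
        exact List.mem_cons.mpr (Or.inr ((ih hd).mpr ⟨c', hdw, by rw [← hagree c' hdw]; exact hcnt⟩))

-- B's membership test, pulled back to the unsorted line
theorem b_side (s : List Char) (n : Nat) :
    n ∈ runLengths (PySem.List.sorted s (fun x => x) false) ↔ ∃ c ∈ s, s.count c = n := by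
  have hp : (PySem.List.sorted s (fun x => x) false).Pairwise (· ≤ ·) := by
    simpa using PySem.List.sorted_pairwise s (fun x => x)
  have hperm : (PySem.List.sorted s (fun x => x) false).Perm s := PySem.List.sorted_perm s _ _
  rw [mem_runLengths _ hp]
  constructor
  · rintro ⟨c, hc, hcnt⟩
    exact ⟨c, hperm.mem_iff.mp hc, by rw [← hperm.count_eq]; exact hcnt⟩
  · rintro ⟨c, hc, hcnt⟩
    exact ⟨c, hperm.mem_iff.mpr hc, by rw [hperm.count_eq]; exact hcnt⟩

-- the two per-line tests agree
theorem line_eq (s : List Char) (n : Nat) :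
    ((PySem.Dict.counter s).keys.any (fun k => (PySem.Dict.counter s).getD k 0 == (n : Int)))
    = decide (n ∈ runLengths (PySem.List.sorted s (fun x => x) false)) := by
  have h2 : (((PySem.Dict.counter s).keys.any (fun k => (PySem.Dict.counter s).getD k 0 == (n : Int))) = true)
      ↔ n ∈ runLengths (PySem.List.sorted s (fun x => x) false) := by
    rw [a_side, b_side]
    constructor
    · rintro ⟨c, hc, hcnt⟩; exact ⟨c, hc, by exact_mod_cast hcnt⟩
    · rintro ⟨c, hc, hcnt⟩; exact ⟨c, hc, by exact_mod_cast hcnt⟩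
  cases hB : ((PySem.Dict.counter s).keys.any (fun k => (PySem.Dict.counter s).getD k 0 == (n : Int))) with
  | false =>
    symm
    exact decide_eq_false (fun hmem => by rw [h2.mpr hmem] at hB; cases hB)
  | true =>
    symm
    exact decide_eq_true (h2.mp hB)

-- ===== VERDICT (by name: the statement is the Claim_ definition above) =====
theorem solve_spec : Claim_equal_solve := by
  intro lines _
  unfold Spec_solve solve solve_alt
  simp only []
  have hfold := List.foldl_ext
    (fun (p : Int × Int) line =>
      let d := line.toList.foldl (fun (d : PySem.Dict Char Int) l =>
        if d.contains l then d.insert l (d.getD l 0 + 1) else d.insert l 1) PySem.Dict.empty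
      let two := if d.keys.any (fun k => d.getD k 0 == 2) then p.1 + 1 else p.1
      let three := if d.keys.any (fun k => d.getD k 0 == 3) then p.2 + 1 else p.2
      (two, three))
    (fun (p : Int × Int) line =>
      let runs := runLengths (PySem.List.sorted line.toList (fun x => x) false)
      (p.1 + (if 2 ∈ runs then 1 else 0), p.2 + (if 3 ∈ runs then 1 else 0)))
    ((0 : Int), (0 : Int)) (l := lines) ?_
  · rw [hfold]
  · intro p line _
    simp only []
    rw [counter_fold line.toList]
    have h2 := line_eq line.toList 2
    have h3 := line_eq line.toList 3
    simp only [Nat.cast_ofNat] at h2 h3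
    rw [h2, h3]
    by_cases m2 : (2 : Nat) ∈ runLengths (PySem.List.sorted line.toList (fun x => x) false) <;>
      by_cases m3 : (3 : Nat) ∈ runLengths (PySem.List.sorted line.toList (fun x => x) false) <;>
        simp [m2, m3]
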